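-- pv_equiv track=rewrite | github.com/IAjimi/AdventOfCode | 2020/AOC17.py | cube_activation
-- ===== SOURCE A (Python) =====
-- def get_neighbors_positions(i,j,k,l, dim4 = False):
--     '''Gets the position of neighbors for any given cube. '''
--     if dim4 == True:
--         neighbor_positions = [(i+a, j+b, k+c, l+d) for a in range(-1,2) for b in range(-1,2) for c in range(-1,2) for d in range(-1,2)]
--     else:
--         neighbor_positions = [(i+a, j+b, k+c, 0) for a in range(-1,2) for b in range(-1,2) for c in range(-1,2)]
--
--     neighbor_positions = [v for v in neighbor_positions if v != (i,j,k,l)]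
--
--     return neighbor_positions
--
-- def count_neighbors_active(current_plane, neighbors, k):
--     ''' Counts the number of active neighbors.
--     Only looks at neighbors in the current plane, since those outside are all inactive.'''
--     neigh = neighbors[k]
--     active_neighbors = [current_plane[v] for v in neigh if v in current_plane.keys()]
--     return active_neighbors.count('#')
--
-- def expand_plane(current_plane, neighbors, dim4 = False):
--     ''' Expand the plane to add neighbors that might be affected (turned into cubes)
--     during iteration. Because inactive cubes can only be changed by active cubes,
--     this only adds neighbors of active cubes.'''
--     current_keys = list(current_plane.keys())
--
--     for k in current_keys:
--         neigh = neighbors[k]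
--         val = current_plane[k]
--
--         if val == '#':
--             for n in neigh:
--                 if n not in current_keys:
--                     current_plane[n] = '.'
--                     neighbors[n] = get_neighbors_positions(n[0],n[1],n[2],n[3], dim4)
--
--     return current_plane, neighbors
--
-- def cube_activation(current_plane, dim4):
--     '''Iterates through the expanded version of the current plane.
--     Stores the new status of every cube (active or inactive) into a
--     new plane. '''
--     new_plane = {}
--     neighbors = {k:get_neighbors_positions(k[0], k[1], k[2], k[3], dim4) for k in current_plane.keys()}
--     current_plane, neighbors = expand_plane(current_plane, neighbors, dim4)
--
--     for k,v in current_plane.items():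
--         neigh = count_neighbors_active(current_plane, neighbors, k)
--
--         if v == '#' and neigh not in [2, 3]:
--             new_plane[k] = '.'
--         elif v == '.' and neigh == 3:
--             new_plane[k] = '#'
--         else:
--             new_plane[k] = v
--
--     return new_plane
-- ===== SOURCE B (Python) =====
-- _OFFS3 = [(a, b, c) for a in (-1, 0, 1) for b in (-1, 0, 1) for c in (-1, 0, 1)]
-- _OFFS4 = [(a, b, c, d) for a in (-1, 0, 1) for b in (-1, 0, 1)
--           for c in (-1, 0, 1) for d in (-1, 0, 1)]
--
--
-- def _neighborhood(x, dim4):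
--     i, j, k, l = x
--     if dim4:
--         pos = [(i + a, j + b, k + c, l + d) for (a, b, c, d) in _OFFS4]
--     else:
--         pos = [(i + a, j + b, k + c, 0) for (a, b, c) in _OFFS3]
--     return [p for p in pos if p != x]
--
--
-- def cube_activation(current_plane, dim4):
--     '''Scatter-style life step: each active cube increments a counter at every
--     position it neighbours; every cell is then classified by one counter lookup.
--     Like the original, it grows the argument dict in place.'''
--     active = [k for k, v in current_plane.items() if v == '#']
--
--     # grow the plane in place (the original mutates its argument the same way):
--     # every neighbour of an active cube becomes an explicit inactive cell
--     for x in active: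
--         for n in _neighborhood(x, dim4):
--             if n not in current_plane:
--                 current_plane[n] = '.'
--
--     # scatter: a position receives one unit from each active cube it neighbours
--     if dim4:
--         pts = [(i + a, j + b, k + c, l + d)
--                for (i, j, k, l) in active for (a, b, c, d) in _OFFS4]
--     else:
--         # in 3-D mode neighbourhoods live on the l = 0 slab, so only active
--         # cubes with l == 0 are ever counted, and the count of a cell only
--         # depends on its first three coordinates
--         pts = [(i + a, j + b, k + c)
--                for (i, j, k, l) in active if l == 0 for (a, b, c) in _OFFS3]
--     counts = {}
--     for p in pts:
--         counts[p] = counts.get(p, 0) + 1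
--
--     active_set = set(active)
--     new_plane = {}
--     for x, v in current_plane.items():
--         if dim4:
--             n = counts.get(x, 0) - (1 if x in active_set else 0)
--         else:
--             n = counts.get(x[:3], 0) - (1 if x[3] == 0 and x in active_set else 0)
--         if v == '#':
--             new_plane[x] = '#' if n in (2, 3) else '.'
--         elif v == '.':
--             new_plane[x] = '#' if n == 3 else '.'
--         else:
--             new_plane[x] = v
--     return new_plane
-- ===== Notes on version B (the rewrite author's own statement) =====
-- stated objective: faster
-- what changed: Replaces the gather-style step (precompute a dict mapping every cell to its 26/80 neighbour positions, then per cell look each position up in the plane and count '#') by a scatter-style step: each active cube increments a plain counter dict at every position it neighbours, and each cell is classified from one counter lookup with a self-correction; the neighbours dict disappears entirely.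
import Mathlib
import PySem

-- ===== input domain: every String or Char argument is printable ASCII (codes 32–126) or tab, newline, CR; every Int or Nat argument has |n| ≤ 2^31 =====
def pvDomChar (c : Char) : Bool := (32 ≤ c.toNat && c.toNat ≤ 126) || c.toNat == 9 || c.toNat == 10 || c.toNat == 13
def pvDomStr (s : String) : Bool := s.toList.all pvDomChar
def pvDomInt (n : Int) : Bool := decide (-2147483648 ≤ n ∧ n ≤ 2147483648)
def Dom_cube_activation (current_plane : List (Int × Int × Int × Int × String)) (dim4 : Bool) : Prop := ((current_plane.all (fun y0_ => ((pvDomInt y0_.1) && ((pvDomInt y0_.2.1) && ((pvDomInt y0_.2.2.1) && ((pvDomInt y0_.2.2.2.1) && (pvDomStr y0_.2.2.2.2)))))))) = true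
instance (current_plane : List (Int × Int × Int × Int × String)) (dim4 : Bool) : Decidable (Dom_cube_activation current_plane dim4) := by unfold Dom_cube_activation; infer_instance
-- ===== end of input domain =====

-- B replaces A's gather (a neighbour-position dict + per-cell plane lookups) by a scatter
-- counter over the active cells (measured faster in a timing run).  Both Pythons grow the
-- argument dict in place identically; the theorems are about the RETURN value (dict as value).

-- ===== PORT A =====
def get_neighbors_positions (i j k l : Int) (dim4 : Bool) : List (Int × Int × Int × Int) :=
  let neighbor_positions : List (Int × Int × Int × Int) :=
    if dim4 = true then
      (PySem.List.pyRange (-1) 2 1).flatMap (fun a =>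
        (PySem.List.pyRange (-1) 2 1).flatMap (fun b =>
          (PySem.List.pyRange (-1) 2 1).flatMap (fun c =>
            (PySem.List.pyRange (-1) 2 1).map (fun d => (i+a, j+b, k+c, l+d)))))
    else
      (PySem.List.pyRange (-1) 2 1).flatMap (fun a =>
        (PySem.List.pyRange (-1) 2 1).flatMap (fun b =>
          (PySem.List.pyRange (-1) 2 1).map (fun c => (i+a, j+b, k+c, (0:Int)))))
  neighbor_positions.filter (fun v => v != (i, j, k, l))

-- [current_plane[v] for v in neigh if v in current_plane.keys()] is exactly filterMap get?
def count_neighbors_active (current_plane : PySem.Dict (Int × Int × Int × Int) String)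
    (neighbors : PySem.Dict (Int × Int × Int × Int) (List (Int × Int × Int × Int)))
    (k : Int × Int × Int × Int) : Nat :=
  let neigh := (neighbors.get? k).getD []   -- neighbors[k]; k is always a key of neighbors here
  let active_neighbors := neigh.filterMap (fun v => current_plane.get? v)
  active_neighbors.count "#"

def expand_plane (current_plane : PySem.Dict (Int × Int × Int × Int) String)
    (neighbors : PySem.Dict (Int × Int × Int × Int) (List (Int × Int × Int × Int)))
    (dim4 : Bool) :
    PySem.Dict (Int × Int × Int × Int) String × PySem.Dict (Int × Int × Int × Int) (List (Int × Int × Int × Int)) :=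
  let current_keys := current_plane.keys
  current_keys.foldl (fun st k =>
    let neigh := (st.2.get? k).getD []      -- neighbors[k]; always present
    let val := (st.1.get? k).getD ""        -- current_plane[k]; always present
    if val = "#" then
      neigh.foldl (fun st2 n =>
        if current_keys.contains n then st2
        else (st2.1.insert n ".",
              st2.2.insert n (get_neighbors_positions n.1 n.2.1 n.2.2.1 n.2.2.2 dim4))) st
    else st) (current_plane, neighbors)

-- rows (i,j,k,l,v) are a dict {(i,j,k,l): v}: regroup at the boundary, flatten at return
def cube_activation (current_plane : List (Int × Int × Int × Int × String)) (dim4 : Bool) : List (Int × Int × Int × Int × String) :=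
  let cp := PySem.Dict.ofList (current_plane.map (fun r => ((r.1, r.2.1, r.2.2.1, r.2.2.2.1), r.2.2.2.2)))
  let neighbors := cp.keys.foldl
    (fun d k => d.insert k (get_neighbors_positions k.1 k.2.1 k.2.2.1 k.2.2.2 dim4))
    PySem.Dict.empty
  let st := expand_plane cp neighbors dim4
  let new_plane := st.1.items.foldl (fun np kv =>
    let neigh := count_neighbors_active st.1 st.2 kv.1
    if kv.2 = "#" ∧ neigh ∉ ([2, 3] : List Nat) then np.insert kv.1 "."
    else if kv.2 = "." ∧ neigh = 3 then np.insert kv.1 "#"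
    else np.insert kv.1 kv.2) PySem.Dict.empty
  new_plane.items.map (fun kv => (kv.1.1, kv.1.2.1, kv.1.2.2.1, kv.1.2.2.2, kv.2))

-- ===== PORT B =====
def offs3 : List (Int × Int × Int) :=
  [(-1 : Int), 0, 1].flatMap (fun a => [(-1 : Int), 0, 1].flatMap (fun b =>
    [(-1 : Int), 0, 1].map (fun c => (a, b, c))))

def offs4 : List (Int × Int × Int × Int) :=
  [(-1 : Int), 0, 1].flatMap (fun a => [(-1 : Int), 0, 1].flatMap (fun b =>
    [(-1 : Int), 0, 1].flatMap (fun c => [(-1 : Int), 0, 1].map (fun d => (a, b, c, d)))))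

def neighborhood (x : Int × Int × Int × Int) (dim4 : Bool) : List (Int × Int × Int × Int) :=
  let pos : List (Int × Int × Int × Int) :=
    if dim4 then offs4.map (fun o => (x.1 + o.1, x.2.1 + o.2.1, x.2.2.1 + o.2.2.1, x.2.2.2 + o.2.2.2))
    else offs3.map (fun o => (x.1 + o.1, x.2.1 + o.2.1, x.2.2.1 + o.2.2, (0 : Int)))
  pos.filter (fun p => p != x)

-- Python B keeps one counter dict whose key shape depends on dim4; typed, that is
-- one dict per branch (the untaken branch stays empty).
def cube_activation_alt (current_plane : List (Int × Int × Int × Int × String)) (dim4 : Bool) : List (Int × Int × Int × Int × String) :=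
  let plane := PySem.Dict.ofList (current_plane.map (fun r => ((r.1, r.2.1, r.2.2.1, r.2.2.2.1), r.2.2.2.2)))
  let active := (plane.items.filter (fun kv => kv.2 == "#")).map (·.1)
  let plane := active.foldl (fun pl x =>
      (neighborhood x dim4).foldl (fun pl n => if pl.contains n then pl else pl.insert n ".") pl)
    plane
  let counts4 : PySem.Dict (Int × Int × Int × Int) Int :=
    if dim4 then
      (active.flatMap (fun y => offs4.map (fun o => (y.1 + o.1, y.2.1 + o.2.1, y.2.2.1 + o.2.2.1, y.2.2.2 + o.2.2.2)))).foldl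
        (fun d p => d.insert p (d.getD p 0 + 1)) PySem.Dict.empty
    else PySem.Dict.empty
  let counts3 : PySem.Dict (Int × Int × Int) Int :=
    if dim4 then PySem.Dict.empty
    else
      ((active.filter (fun y => y.2.2.2 == 0)).flatMap (fun y => offs3.map (fun o => (y.1 + o.1, y.2.1 + o.2.1, y.2.2.1 + o.2.2)))).foldl
        (fun d p => d.insert p (d.getD p 0 + 1)) PySem.Dict.empty
  let active_set := PySem.Set.ofList active
  let new_plane := plane.items.foldl (fun np kv =>
    let x := kv.1
    let n : Int :=
      if dim4 then counts4.getD x 0 - (if active_set.contains x then 1 else 0)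
      else counts3.getD (x.1, x.2.1, x.2.2.1) 0 - (if x.2.2.2 == 0 && active_set.contains x then 1 else 0)
    np.insert x
      (if kv.2 = "#" then (if n = 2 ∨ n = 3 then "#" else ".")
       else if kv.2 = "." then (if n = 3 then "#" else ".")
       else kv.2)) PySem.Dict.empty
  new_plane.items.map (fun kv => (kv.1.1, kv.1.2.1, kv.1.2.2.1, kv.1.2.2.2, kv.2))

-- ===== PRECONDITION & SPEC =====
def Spec_cube_activation (current_plane : List (Int × Int × Int × Int × String)) (dim4 : Bool) (out : List (Int × Int × Int × Int × String)) : Prop := out = cube_activation_alt current_plane dim4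
instance (current_plane : List (Int × Int × Int × Int × String)) (dim4 : Bool) (out : List (Int × Int × Int × Int × String)) : Decidable (Spec_cube_activation current_plane dim4 out) := by unfold Spec_cube_activation; infer_instance

-- ===== CLAIM (what is proved, stated in full; the proofs are below) =====
def Claim_equal_cube_activation : Prop := ∀ (current_plane : List (Int × Int × Int × Int × String)) (dim4 : Bool), Dom_cube_activation current_plane dim4 → Spec_cube_activation current_plane dim4 (cube_activation current_plane dim4)


-- ===== LEMMAS AND PROOFS =====
abbrev PVK : Type := Int × Int × Int × Int

-- the two neighbourhood generators produce the same list
lemma pv_gnp_eq (x : PVK) (dim4 : Bool) :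
    get_neighbors_positions x.1 x.2.1 x.2.2.1 x.2.2.2 dim4 = neighborhood x dim4 := by
  obtain ⟨i, j, k, l⟩ := x
  cases dim4 <;> rfl

lemma pv_count_filterMap {α : Type} [DecidableEq α] (g : PVK → Option α) (l : List PVK) (a : α) :
    (l.filterMap g).count a = l.countP (fun v => g v == some a) := by
  induction l with
  | nil => rfl
  | cons x xs ih =>
    rw [List.filterMap_cons, List.countP_cons]
    cases hg : g x with
    | none => simp [ih]
    | some b =>
      by_cases hb : b = a <;> simp [hb, ih]

lemma pv_countP_or {α : Type} (p q : α → Bool) (l : List α)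
    (h : ∀ x ∈ l, ¬(p x = true ∧ q x = true)) :
    l.countP (fun x => p x || q x) = l.countP p + l.countP q := by
  induction l with
  | nil => rfl
  | cons x xs ih =>
    have hx := h x (List.mem_cons_self ..)
    have hxs : ∀ y ∈ xs, ¬(p y = true ∧ q y = true) := fun y hy => h y (List.mem_cons_of_mem _ hy)
    rw [List.countP_cons, List.countP_cons, List.countP_cons, ih hxs]
    by_cases hp : p x = true <;> by_cases hq : q x = true <;> simp [hp, hq] at * <;> omega

lemma pv_countP_swap {α : Type} [BEq α] [LawfulBEq α] (l₁ l₂ : List α)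
    (h₁ : l₁.Nodup) (h₂ : l₂.Nodup) :
    l₁.countP (fun v => decide (v ∈ l₂)) = l₂.countP (fun v => decide (v ∈ l₁)) := by
  induction l₁ with
  | nil => simp
  | cons a l₁ ih =>
    have hna : a ∉ l₁ := (List.nodup_cons.mp h₁).1
    have h₁' := (List.nodup_cons.mp h₁).2
    rw [List.countP_cons, ih h₁']
    have hsplit : l₂.countP (fun v => decide (v ∈ a :: l₁))
        = l₂.countP (fun v => (v == a) || decide (v ∈ l₁)) := by
      apply List.countP_congr; intro x _
      simp [List.mem_cons]
    rw [hsplit, pv_countP_or _ _ _ (by intro x _ hx; exact hna (eq_of_beq hx.1 ▸ of_decide_eq_true hx.2))]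
    have hcnt : l₂.countP (fun v => v == a) = if a ∈ l₂ then 1 else 0 := by
      rw [← List.count_eq_countP]
      split
      · exact List.count_eq_one_of_mem h₂ (by assumption)
      · exact List.count_eq_zero_of_not_mem (by assumption)
    rw [hcnt]; by_cases h : a ∈ l₂ <;> simp [h]
    omega

-- characterisation of the dict built by 'for k in l: d[k] = f(k)'
lemma pv_foldl_insert_fn_get? {ν : Type} (l : List PVK) (d : PySem.Dict PVK ν) (f : PVK → ν) (k' : PVK) :
    (l.foldl (fun d k => d.insert k (f k)) d).get? k' = if k' ∈ l then some (f k') else d.get? k' := by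
  induction l generalizing d with
  | nil => simp
  | cons a l ih =>
    rw [List.foldl_cons, ih]
    rw [PySem.Dict.get?_insert]
    by_cases h1 : k' ∈ l <;> by_cases h2 : k' = a <;> simp [h1, h2, List.mem_cons]

lemma pv_insert_eq_self {ν : Type} [DecidableEq ν] (d : PySem.Dict PVK ν) (k : PVK) (v : ν)
    (hnd : d.keys.Nodup) (hget : d.get? k = some v) : d.insert k v = d := by
  apply PySem.Dict.ext
  have hc : d.contains k = true := by
    rw [PySem.Dict.contains_iff_mem_keys]
    by_contra hn
    rw [← PySem.Dict.get?_eq_none_iff_not_mem_keys] at hn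
    rw [hn] at hget; cases hget
  rw [PySem.Dict.items_insert_of_contains d v hc]
  have hkv : (k, v) ∈ d.items := (PySem.Dict.get?_eq_some_iff_mem_items d k v hnd).mp hget
  conv_rhs => rw [← List.map_id d.items]
  apply List.map_congr_left
  intro p hp
  by_cases hpk : p.1 = k
  · have hthis : d.get? p.1 = some p.2 := PySem.Dict.get?_of_mem_items d (by simpa using hp) hnd
    rw [hpk, hget] at hthis
    have h2 : p.2 = v := (Option.some_inj.mp hthis).symm
    simp only [hpk, beq_self_eq_true, if_true]
    rw [← hpk, ← h2]
    rfl
  · simp [hpk]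

-- ---- expansion: A's expand_plane against B's in-place growth ----

def pvInv (orig pl : PySem.Dict PVK String) (nb : PySem.Dict PVK (List PVK)) (dim4 : Bool) : Prop :=
  pl.keys.Nodup ∧ nb.keys.Nodup ∧
  (∀ k ∈ orig.keys, pl.get? k = orig.get? k) ∧
  (∀ n ∈ pl.keys, n ∈ orig.keys ∨ pl.get? n = some ".") ∧
  (∀ k ∈ orig.keys, k ∈ pl.keys) ∧
  (∀ k ∈ pl.keys, nb.get? k = some (get_neighbors_positions k.1 k.2.1 k.2.2.1 k.2.2.2 dim4))

lemma pv_inner_fold (orig : PySem.Dict PVK String) (dim4 : Bool) (ns : List PVK)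
    (st : PySem.Dict PVK String × PySem.Dict PVK (List PVK))
    (hinv : pvInv orig st.1 st.2 dim4) :
    (ns.foldl (fun st2 n =>
        if orig.keys.contains n then st2
        else (st2.1.insert n ".",
              st2.2.insert n (get_neighbors_positions n.1 n.2.1 n.2.2.1 n.2.2.2 dim4))) st).1
      = ns.foldl (fun pl n => if pl.contains n then pl else pl.insert n ".") st.1
    ∧ pvInv orig
        (ns.foldl (fun st2 n =>
          if orig.keys.contains n then st2
          else (st2.1.insert n ".",
                st2.2.insert n (get_neighbors_positions n.1 n.2.1 n.2.2.1 n.2.2.2 dim4))) st).1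
        (ns.foldl (fun st2 n =>
          if orig.keys.contains n then st2
          else (st2.1.insert n ".",
                st2.2.insert n (get_neighbors_positions n.1 n.2.1 n.2.2.1 n.2.2.2 dim4))) st).2 dim4 := by
  induction ns generalizing st with
  | nil => exact ⟨rfl, hinv⟩
  | cons n ns ih =>
    obtain ⟨hnd, hnbnd, hpres, hdot, hsub, hnb⟩ := hinv
    rw [List.foldl_cons, List.foldl_cons]
    by_cases hmem : n ∈ orig.keys
    · have hc : orig.keys.contains n = true := List.elem_eq_true_of_mem hmem
      have hbc : st.1.contains n = true := (PySem.Dict.contains_iff_mem_keys _ _).mpr (hsub n hmem)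
      rw [if_pos hc, if_pos hbc]
      exact ih st ⟨hnd, hnbnd, hpres, hdot, hsub, hnb⟩
    · have hc : ¬ (orig.keys.contains n = true) := fun h => hmem (List.mem_of_elem_eq_true h)
      rw [if_neg hc]
      by_cases hbc : st.1.contains n = true
      · have hkeys : n ∈ st.1.keys := (PySem.Dict.contains_iff_mem_keys _ _).mp hbc
        have hdotn : st.1.get? n = some "." := (hdot n hkeys).resolve_left hmem
        have e1 : st.1.insert n "." = st.1 := pv_insert_eq_self _ _ _ hnd hdotn
        have e2 : st.2.insert n (get_neighbors_positions n.1 n.2.1 n.2.2.1 n.2.2.2 dim4) = st.2 :=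
          pv_insert_eq_self _ _ _ hnbnd (hnb n hkeys)
        rw [if_pos hbc, e1, e2]
        exact ih st ⟨hnd, hnbnd, hpres, hdot, hsub, hnb⟩
      · rw [if_neg hbc]
        have hnmem : n ∉ st.1.keys := fun h => hbc ((PySem.Dict.contains_iff_mem_keys _ _).mpr h)
        refine ih (st.1.insert n ".", st.2.insert n (get_neighbors_positions n.1 n.2.1 n.2.2.1 n.2.2.2 dim4)) ?_
        refine ⟨PySem.Dict.nodup_keys_insert _ _ _ hnd, PySem.Dict.nodup_keys_insert _ _ _ hnbnd, ?_, ?_, ?_, ?_⟩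
        · intro k hk
          rw [PySem.Dict.get?_insert, if_neg (by rintro rfl; exact hmem hk)]
          exact hpres k hk
        · intro m hm
          rcases (PySem.Dict.mem_keys_insert _ _ _ _).mp hm with hmn | hmk
          · right; rw [hmn, PySem.Dict.get?_insert_self]
          · by_cases hmn : m = n
            · right; rw [hmn, PySem.Dict.get?_insert_self]
            · rcases hdot m hmk with h | h
              · exact Or.inl h
              · right; rw [PySem.Dict.get?_insert, if_neg hmn]; exact h
        · intro k hk
          exact (PySem.Dict.mem_keys_insert _ _ _ _).mpr (Or.inr (hsub k hk))
        · intro k hk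
          rcases (PySem.Dict.mem_keys_insert _ _ _ _).mp hk with hkn | hkk
          · rw [hkn, PySem.Dict.get?_insert_self]
          · by_cases hkn : k = n
            · rw [hkn, PySem.Dict.get?_insert_self]
            · rw [PySem.Dict.get?_insert, if_neg hkn]
              exact hnb k hkk

lemma pv_outer_fold (orig : PySem.Dict PVK String) (dim4 : Bool) (ks : List PVK)
    (hks : ∀ k ∈ ks, k ∈ orig.keys)
    (st : PySem.Dict PVK String × PySem.Dict PVK (List PVK))
    (hinv : pvInv orig st.1 st.2 dim4) :
    (ks.foldl (fun st k =>
        if (st.1.get? k).getD "" = "#" then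
          List.foldl (fun st2 n =>
            if orig.keys.contains n then st2
            else (st2.1.insert n ".",
                  st2.2.insert n (get_neighbors_positions n.1 n.2.1 n.2.2.1 n.2.2.2 dim4))) st
            ((st.2.get? k).getD [])
        else st) st).1
      = (ks.filter (fun k => (orig.get? k).getD "" == "#")).foldl
          (fun pl x => (neighborhood x dim4).foldl
            (fun pl n => if pl.contains n then pl else pl.insert n ".") pl) st.1
    ∧ pvInv orig
        ((ks.foldl (fun st k =>
          if (st.1.get? k).getD "" = "#" then
            List.foldl (fun st2 n =>
              if orig.keys.contains n then st2
              else (st2.1.insert n ".",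
                    st2.2.insert n (get_neighbors_positions n.1 n.2.1 n.2.2.1 n.2.2.2 dim4))) st
              ((st.2.get? k).getD [])
          else st) st)).1
        ((ks.foldl (fun st k =>
          if (st.1.get? k).getD "" = "#" then
            List.foldl (fun st2 n =>
              if orig.keys.contains n then st2
              else (st2.1.insert n ".",
                    st2.2.insert n (get_neighbors_positions n.1 n.2.1 n.2.2.1 n.2.2.2 dim4))) st
              ((st.2.get? k).getD [])
          else st) st)).2 dim4 := by
  induction ks generalizing st with
  | nil => exact ⟨rfl, hinv⟩
  | cons k ks ih =>
    have hinv0 := hinv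
    obtain ⟨hnd, hnbnd, hpres, hdot, hsub, hnb⟩ := hinv
    have hkmem : k ∈ orig.keys := hks k (List.mem_cons_self ..)
    have hks' : ∀ j ∈ ks, j ∈ orig.keys := fun j hj => hks j (List.mem_cons_of_mem _ hj)
    have hval : (st.1.get? k).getD "" = (orig.get? k).getD "" := by rw [hpres k hkmem]
    have hneigh : (st.2.get? k).getD [] = get_neighbors_positions k.1 k.2.1 k.2.2.1 k.2.2.2 dim4 := by
      rw [hnb k (hsub k hkmem)]; rfl
    rw [List.foldl_cons, List.filter_cons]
    simp only [hval, hneigh]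
    by_cases hv : (orig.get? k).getD "" = "#"
    · have hfilt : ((orig.get? k).getD "" == "#") = true := by simp [hv]
      rw [if_pos hv, hfilt, if_pos rfl, List.foldl_cons, ← pv_gnp_eq k dim4]
      obtain ⟨heq, hinv'⟩ :=
        pv_inner_fold orig dim4 (get_neighbors_positions k.1 k.2.1 k.2.2.1 k.2.2.2 dim4) st hinv0
      rw [← heq]
      exact ih hks' _ hinv'
    · have hfilt : ((orig.get? k).getD "" == "#") = false := by simp [hv]
      rw [if_neg hv, hfilt]
      simp only [Bool.false_eq_true, if_false]
      exact ih hks' st hinv0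

-- B's active list is a filter of the key list
lemma pv_active_eq (orig : PySem.Dict PVK String) (h : orig.keys.Nodup) :
    (orig.items.filter (fun kv => kv.2 == "#")).map (·.1)
      = orig.keys.filter (fun k => (orig.get? k).getD "" == "#") := by
  rw [PySem.Dict.items_eq_map_keys orig h ""]
  rw [List.filter_map, List.map_map]
  simp [Function.comp_def, PySem.Dict.getD_eq_get?_getD]

-- ---- membership in the generated neighbourhoods ----

lemma pv_mem_i3 (a : Int) : a ∈ ([(-1 : Int), 0, 1] : List Int) ↔ -1 ≤ a ∧ a ≤ 1 := by
  simp; omega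

lemma pv_mem_offs4 (a b c d : Int) :
    ((a, b, c, d) : PVK) ∈ offs4 ↔ -1 ≤ a ∧ a ≤ 1 ∧ -1 ≤ b ∧ b ≤ 1 ∧ -1 ≤ c ∧ c ≤ 1 ∧ -1 ≤ d ∧ d ≤ 1 := by
  simp only [offs4, List.mem_flatMap, List.mem_map, pv_mem_i3, Prod.mk.injEq]
  constructor
  · rintro ⟨a', ha, b', hb, c', hc, d', hd, h1, h2, h3, h4⟩
    subst h1; subst h2; subst h3; subst h4
    exact ⟨ha.1, ha.2, hb.1, hb.2, hc.1, hc.2, hd.1, hd.2⟩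
  · rintro ⟨h1, h2, h3, h4, h5, h6, h7, h8⟩
    exact ⟨a, ⟨h1, h2⟩, b, ⟨h3, h4⟩, c, ⟨h5, h6⟩, d, ⟨h7, h8⟩, rfl, rfl, rfl, rfl⟩

lemma pv_mem_offs3 (a b c : Int) :
    ((a, b, c) : Int × Int × Int) ∈ offs3 ↔ -1 ≤ a ∧ a ≤ 1 ∧ -1 ≤ b ∧ b ≤ 1 ∧ -1 ≤ c ∧ c ≤ 1 := by
  simp only [offs3, List.mem_flatMap, List.mem_map, pv_mem_i3, Prod.mk.injEq]
  constructor
  · rintro ⟨a', ha, b', hb, c', hc, h1, h2, h3⟩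
    subst h1; subst h2; subst h3
    exact ⟨ha.1, ha.2, hb.1, hb.2, hc.1, hc.2⟩
  · rintro ⟨h1, h2, h3, h4, h5, h6⟩
    exact ⟨a, ⟨h1, h2⟩, b, ⟨h3, h4⟩, c, ⟨h5, h6⟩, rfl, rfl, rfl⟩

lemma pv_nodup_offs4 : offs4.Nodup := by decide
lemma pv_nodup_offs3 : offs3.Nodup := by decide

lemma pv_nodup_neighborhood (x : PVK) (dim4 : Bool) : (neighborhood x dim4).Nodup := by
  unfold neighborhood
  apply List.Nodup.filter
  cases dim4
  · simp only [Bool.false_eq_true, if_false]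
    refine List.Nodup.map ?_ pv_nodup_offs3
    intro o1 o2 h
    obtain ⟨a1, b1, c1⟩ := o1; obtain ⟨a2, b2, c2⟩ := o2
    simp only [Prod.mk.injEq] at h ⊢
    omega
  · simp only [if_true]
    refine List.Nodup.map ?_ pv_nodup_offs4
    intro o1 o2 h
    obtain ⟨a1, b1, c1, d1⟩ := o1; obtain ⟨a2, b2, c2, d2⟩ := o2
    simp only [Prod.mk.injEq] at h ⊢
    omega

lemma pv_mem_nbhd4 (x y : PVK) :
    y ∈ neighborhood x true ↔
      (y.1 - x.1) ≤ 1 ∧ -1 ≤ (y.1 - x.1) ∧ (y.2.1 - x.2.1) ≤ 1 ∧ -1 ≤ (y.2.1 - x.2.1) ∧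
      (y.2.2.1 - x.2.2.1) ≤ 1 ∧ -1 ≤ (y.2.2.1 - x.2.2.1) ∧ (y.2.2.2 - x.2.2.2) ≤ 1 ∧ -1 ≤ (y.2.2.2 - x.2.2.2) ∧ y ≠ x := by
  obtain ⟨x1, x2, x3, x4⟩ := x; obtain ⟨y1, y2, y3, y4⟩ := y
  simp only [neighborhood, if_true, List.mem_filter, List.mem_map, bne_iff_ne, ne_eq]
  constructor
  · rintro ⟨⟨o, ho, heq⟩, hne⟩
    obtain ⟨a, b, c, d⟩ := o
    rw [pv_mem_offs4] at ho
    simp only [Prod.mk.injEq] at heq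
    obtain ⟨e1, e2, e3, e4⟩ := heq
    obtain ⟨g1, g2, g3, g4, g5, g6, g7, g8⟩ := ho
    refine ⟨by omega, by omega, by omega, by omega, by omega, by omega, by omega, by omega, hne⟩
  · rintro ⟨h1, h2, h3, h4, h5, h6, h7, h8, hne⟩
    refine ⟨⟨(y1 - x1, y2 - x2, y3 - x3, y4 - x4), ?_, ?_⟩, hne⟩
    · rw [pv_mem_offs4]; omega
    · simp only [Prod.mk.injEq]; omega

lemma pv_mem_nbhd3 (x y : PVK) :
    y ∈ neighborhood x false ↔
      (y.1 - x.1) ≤ 1 ∧ -1 ≤ (y.1 - x.1) ∧ (y.2.1 - x.2.1) ≤ 1 ∧ -1 ≤ (y.2.1 - x.2.1) ∧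
      (y.2.2.1 - x.2.2.1) ≤ 1 ∧ -1 ≤ (y.2.2.1 - x.2.2.1) ∧ y.2.2.2 = 0 ∧ y ≠ x := by
  obtain ⟨x1, x2, x3, x4⟩ := x; obtain ⟨y1, y2, y3, y4⟩ := y
  simp only [neighborhood, Bool.false_eq_true, if_false, List.mem_filter, List.mem_map, bne_iff_ne, ne_eq]
  constructor
  · rintro ⟨⟨o, ho, heq⟩, hne⟩
    obtain ⟨a, b, c⟩ := o
    rw [pv_mem_offs3] at ho
    simp only [Prod.mk.injEq] at heq
    obtain ⟨e1, e2, e3, e4⟩ := heq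
    obtain ⟨g1, g2, g3, g4, g5, g6⟩ := ho
    refine ⟨by omega, by omega, by omega, by omega, by omega, by omega, by omega, hne⟩
  · rintro ⟨h1, h2, h3, h4, h5, h6, h7, hne⟩
    refine ⟨⟨(y1 - x1, y2 - x2, y3 - x3), ?_, ?_⟩, hne⟩
    · rw [pv_mem_offs3]; omega
    · simp only [Prod.mk.injEq]; omega

-- ---- the scatter counters compute A's gather counts ----

lemma pv_count_map_offs4 (y x : PVK) :
    (offs4.map (fun o => (y.1 + o.1, y.2.1 + o.2.1, y.2.2.1 + o.2.2.1, y.2.2.2 + o.2.2.2))).count x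
      = if x.1 - y.1 ≤ 1 ∧ -1 ≤ x.1 - y.1 ∧ x.2.1 - y.2.1 ≤ 1 ∧ -1 ≤ x.2.1 - y.2.1 ∧
           x.2.2.1 - y.2.2.1 ≤ 1 ∧ -1 ≤ x.2.2.1 - y.2.2.1 ∧ x.2.2.2 - y.2.2.2 ≤ 1 ∧ -1 ≤ x.2.2.2 - y.2.2.2
        then 1 else 0 := by
  obtain ⟨x1, x2, x3, x4⟩ := x; obtain ⟨y1, y2, y3, y4⟩ := y
  dsimp only
  rw [List.count_eq_countP, List.countP_map]
  have hcg : offs4.countP ((fun v => v == (x1, x2, x3, x4)) ∘ (fun o : PVK => (y1 + o.1, y2 + o.2.1, y3 + o.2.2.1, y4 + o.2.2.2)))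
      = offs4.countP (fun o => o == (x1 - y1, x2 - y2, x3 - y3, x4 - y4)) := by
    apply List.countP_congr; intro o _
    obtain ⟨a, b, c, d⟩ := o
    rw [Bool.eq_iff_iff]
    simp [Prod.ext_iff]
    omega
  rw [hcg, ← List.count_eq_countP]
  split
  · next h =>
    exact List.count_eq_one_of_mem pv_nodup_offs4 ((pv_mem_offs4 _ _ _ _).mpr (by omega))
  · next h =>
    refine List.count_eq_zero_of_not_mem (fun hm => h ?_)
    rw [pv_mem_offs4] at hm; omega

lemma pv_count_map_offs3 (y : PVK) (t : Int × Int × Int) :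
    (offs3.map (fun o => (y.1 + o.1, y.2.1 + o.2.1, y.2.2.1 + o.2.2))).count t
      = if t.1 - y.1 ≤ 1 ∧ -1 ≤ t.1 - y.1 ∧ t.2.1 - y.2.1 ≤ 1 ∧ -1 ≤ t.2.1 - y.2.1 ∧
           t.2.2 - y.2.2.1 ≤ 1 ∧ -1 ≤ t.2.2 - y.2.2.1
        then 1 else 0 := by
  obtain ⟨t1, t2, t3⟩ := t; obtain ⟨y1, y2, y3, y4⟩ := y
  dsimp only
  rw [List.count_eq_countP, List.countP_map]
  have hcg : offs3.countP ((fun v => v == (t1, t2, t3)) ∘ (fun o : Int × Int × Int => (y1 + o.1, y2 + o.2.1, y3 + o.2.2)))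
      = offs3.countP (fun o => o == (t1 - y1, t2 - y2, t3 - y3)) := by
    apply List.countP_congr; intro o _
    obtain ⟨a, b, c⟩ := o
    rw [Bool.eq_iff_iff]
    simp [Prod.ext_iff]
    omega
  rw [hcg, ← List.count_eq_countP]
  split
  · next h =>
    exact List.count_eq_one_of_mem pv_nodup_offs3 ((pv_mem_offs3 _ _ _).mpr (by omega))
  · next h =>
    refine List.count_eq_zero_of_not_mem (fun hm => h ?_)
    rw [pv_mem_offs3] at hm; omega

lemma pv_sum_map_ite {α : Type} (l : List α) (g : α → Nat) (p : α → Bool)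
    (h : ∀ y ∈ l, g y = if p y then 1 else 0) : (l.map g).sum = l.countP p := by
  induction l with
  | nil => rfl
  | cons a l ih =>
    rw [List.map_cons, List.sum_cons, List.countP_cons,
        ih (fun y hy => h y (List.mem_cons_of_mem _ hy)), h a (List.mem_cons_self ..)]
    cases hp : p a <;> simp [hp] <;> omega

lemma pv_countP_beq_self (l : List PVK) (x : PVK) (h : l.Nodup) :
    l.countP (fun v => v == x) = if x ∈ l then 1 else 0 := by
  rw [← List.count_eq_countP]
  split
  · exact List.count_eq_one_of_mem h (by assumption)
  · exact List.count_eq_zero_of_not_mem (by assumption)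

-- A's gather count at a plane key equals B's counter lookup minus the self term
lemma pv_count_eq (orig pl : PySem.Dict PVK String) (nb : PySem.Dict PVK (List PVK)) (dim4 : Bool)
    (horig : orig.keys.Nodup) (hinv : pvInv orig pl nb dim4) (x : PVK) (hx : x ∈ pl.keys) :
    (count_neighbors_active pl nb x : Int)
      = (if dim4 then
          (((orig.keys.filter (fun k => (orig.get? k).getD "" == "#")).flatMap
             (fun y => offs4.map (fun o => (y.1 + o.1, y.2.1 + o.2.1, y.2.2.1 + o.2.2.1, y.2.2.2 + o.2.2.2)))).foldl
             (fun d p => d.insert p (d.getD p 0 + 1)) PySem.Dict.empty).getD x 0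
          - (if (PySem.Set.ofList (orig.keys.filter (fun k => (orig.get? k).getD "" == "#"))).contains x then (1 : Int) else 0)
        else
          ((((orig.keys.filter (fun k => (orig.get? k).getD "" == "#")).filter (fun y => y.2.2.2 == 0)).flatMap
             (fun y => offs3.map (fun o => (y.1 + o.1, y.2.1 + o.2.1, y.2.2.1 + o.2.2)))).foldl
             (fun d p => d.insert p (d.getD p 0 + 1)) PySem.Dict.empty).getD (x.1, x.2.1, x.2.2.1) 0
          - (if x.2.2.2 == 0 && (PySem.Set.ofList (orig.keys.filter (fun k => (orig.get? k).getD "" == "#"))).contains x then (1 : Int) else 0)) := by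
  obtain ⟨hnd, hnbnd, hpres, hdot, hsub, hnb⟩ := hinv
  set act := orig.keys.filter (fun k => (orig.get? k).getD "" == "#") with hact
  have hactnd : act.Nodup := horig.filter _
  have hsharp : ∀ v, (pl.get? v = some "#") ↔ v ∈ act := by
    intro v
    constructor
    · intro hv
      have hvk : v ∈ pl.keys := by
        by_contra h
        rw [← PySem.Dict.get?_eq_none_iff_not_mem_keys] at h
        rw [h] at hv; cases hv
      rcases hdot v hvk with h | h
      · rw [hact, List.mem_filter]
        refine ⟨h, ?_⟩
        rw [← hpres v h, hv]; rfl
      · rw [h] at hv; simp at hv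
    · intro hv
      rw [hact, List.mem_filter] at hv
      obtain ⟨hvk, hvs⟩ := hv
      rw [hpres v hvk]
      rcases ho : orig.get? v with _ | w
      · exact absurd hvk (by rw [← PySem.Dict.get?_eq_none_iff_not_mem_keys]; exact ho)
      · have hw : w = "#" := by rw [ho] at hvs; simpa using hvs
        rw [hw]
  have hcA : count_neighbors_active pl nb x
      = act.countP (fun v => decide (v ∈ neighborhood x dim4)) := by
    unfold count_neighbors_active
    rw [hnb x hx]
    simp only [Option.getD_some]
    rw [pv_gnp_eq, pv_count_filterMap]
    rw [show (neighborhood x dim4).countP (fun v => pl.get? v == some "#")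
          = (neighborhood x dim4).countP (fun v => decide (v ∈ act)) from
        List.countP_congr (fun v _ => by
          simpa using hsharp v)]
    exact pv_countP_swap _ _ (pv_nodup_neighborhood x dim4) hactnd
  have hmemset : ∀ b : Bool, ((PySem.Set.ofList act).contains x) = decide (x ∈ act) := by
    intro _
    rw [Bool.eq_iff_iff]
    simp [PySem.Set.mem_ofList]
  cases dim4 with
  | true =>
    rw [if_pos rfl]
    rw [PySem.Dict.getD_foldl_insert_add_one]
    rw [List.count_flatMap]
    have hsum : (act.map (List.count x ∘ (fun y : PVK =>
          offs4.map (fun o => (y.1 + o.1, y.2.1 + o.2.1, y.2.2.1 + o.2.2.1, y.2.2.2 + o.2.2.2))))).sum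
        = act.countP (fun y => decide (x.1 - y.1 ≤ 1 ∧ -1 ≤ x.1 - y.1 ∧ x.2.1 - y.2.1 ≤ 1 ∧ -1 ≤ x.2.1 - y.2.1 ∧
            x.2.2.1 - y.2.2.1 ≤ 1 ∧ -1 ≤ x.2.2.1 - y.2.2.1 ∧ x.2.2.2 - y.2.2.2 ≤ 1 ∧ -1 ≤ x.2.2.2 - y.2.2.2)) := by
      apply pv_sum_map_ite
      intro y _
      simp only [Function.comp_apply]
      rw [pv_count_map_offs4]
      simp only [decide_eq_true_eq]
    rw [hsum]
    have hQsplit : act.countP (fun y => decide (x.1 - y.1 ≤ 1 ∧ -1 ≤ x.1 - y.1 ∧ x.2.1 - y.2.1 ≤ 1 ∧ -1 ≤ x.2.1 - y.2.1 ∧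
            x.2.2.1 - y.2.2.1 ≤ 1 ∧ -1 ≤ x.2.2.1 - y.2.2.1 ∧ x.2.2.2 - y.2.2.2 ≤ 1 ∧ -1 ≤ x.2.2.2 - y.2.2.2))
        = act.countP (fun v => decide (v ∈ neighborhood x true) || (v == x)) := by
      apply List.countP_congr
      intro v _
      simp only [decide_eq_true_eq, Bool.or_eq_true, beq_iff_eq, pv_mem_nbhd4]
      constructor
      · intro hB
        by_cases hvx : v = x
        · exact Or.inr hvx
        · exact Or.inl ⟨by omega, by omega, by omega, by omega, by omega, by omega, by omega, by omega, hvx⟩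
      · rintro (⟨h1, h2, h3, h4, h5, h6, h7, h8, _⟩ | rfl) <;> omega
    rw [hQsplit, pv_countP_or _ _ _ (fun v _ hb => by
        have h1 := of_decide_eq_true hb.1
        rw [pv_mem_nbhd4] at h1
        exact h1.2.2.2.2.2.2.2.2 (eq_of_beq hb.2))]
    rw [pv_countP_beq_self _ _ hactnd, hcA, hmemset true]
    by_cases hxa : x ∈ act <;> simp [hxa] <;> omega
  | false =>
    rw [if_neg (by simp)]
    rw [PySem.Dict.getD_foldl_insert_add_one]
    rw [List.count_flatMap]
    have hsum : ((act.filter (fun y => y.2.2.2 == 0)).map (List.count (x.1, x.2.1, x.2.2.1) ∘ (fun y : PVK =>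
          offs3.map (fun o => (y.1 + o.1, y.2.1 + o.2.1, y.2.2.1 + o.2.2))))).sum
        = (act.filter (fun y => y.2.2.2 == 0)).countP (fun y => decide (x.1 - y.1 ≤ 1 ∧ -1 ≤ x.1 - y.1 ∧
            x.2.1 - y.2.1 ≤ 1 ∧ -1 ≤ x.2.1 - y.2.1 ∧ x.2.2.1 - y.2.2.1 ≤ 1 ∧ -1 ≤ x.2.2.1 - y.2.2.1)) := by
      apply pv_sum_map_ite
      intro y _
      simp only [Function.comp_apply]
      rw [pv_count_map_offs3]
      simp only [decide_eq_true_eq]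
    rw [hsum, List.countP_filter]
    have hQsplit : act.countP (fun y => decide (x.1 - y.1 ≤ 1 ∧ -1 ≤ x.1 - y.1 ∧
            x.2.1 - y.2.1 ≤ 1 ∧ -1 ≤ x.2.1 - y.2.1 ∧ x.2.2.1 - y.2.2.1 ≤ 1 ∧ -1 ≤ x.2.2.1 - y.2.2.1) && (y.2.2.2 == 0))
        = act.countP (fun v => decide (v ∈ neighborhood x false) || ((v == x) && (x.2.2.2 == 0))) := by
      apply List.countP_congr
      intro v _
      simp only [decide_eq_true_eq, Bool.or_eq_true, Bool.and_eq_true, beq_iff_eq, pv_mem_nbhd3]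
      constructor
      · rintro ⟨hB, hv4⟩
        by_cases hvx : v = x
        · exact Or.inr ⟨hvx, by rw [← hvx]; exact hv4⟩
        · exact Or.inl ⟨by omega, by omega, by omega, by omega, by omega, by omega, hv4, hvx⟩
      · rintro (⟨h1, h2, h3, h4, h5, h6, h7, _⟩ | ⟨rfl, hx4⟩) <;> constructor <;> omega
    rw [hQsplit, pv_countP_or _ _ _ (fun v _ hb => by
        have h1 := of_decide_eq_true hb.1
        rw [pv_mem_nbhd3] at h1
        exact h1.2.2.2.2.2.2.2 (eq_of_beq (Bool.and_eq_true .. ▸ hb.2).1))]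
    have hsplit2 : act.countP (fun v => (v == x) && (x.2.2.2 == 0))
        = if x.2.2.2 = 0 then (if x ∈ act then 1 else 0) else 0 := by
      by_cases hx4 : x.2.2.2 = 0
      · rw [if_pos hx4]
        rw [show (fun v : PVK => (v == x) && (x.2.2.2 == 0)) = (fun v : PVK => (v == x)) from by
          funext v; simp [hx4]]
        exact pv_countP_beq_self _ _ hactnd
      · rw [if_neg hx4]
        rw [show (fun v : PVK => (v == x) && (x.2.2.2 == 0)) = (fun _ : PVK => false) from by
          funext v; simp [hx4]]
        simp
    rw [hsplit2, hcA, hmemset true]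
    by_cases hxa : x ∈ act <;> by_cases hx4 : x.2.2.2 = 0 <;>
      simp [hxa, hx4] <;> omega

-- ===== VERDICT (by name: the statement is the Claim_ definition above) =====
-- both classification rules produce the same cell value
lemma pv_classify (acc : PySem.Dict PVK String) (k : PVK) (v : String) (m : Nat) (n : Int)
    (hn : n = (m : Int)) :
    (if v = "#" ∧ m ∉ ([2, 3] : List Nat) then acc.insert k "."
     else if v = "." ∧ m = 3 then acc.insert k "#"
     else acc.insert k v)
    = acc.insert k
        (if v = "#" then (if n = 2 ∨ n = 3 then "#" else ".")
         else if v = "." then (if n = 3 then "#" else ".")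
         else v) := by
  subst hn
  by_cases hv1 : v = "#"
  · subst hv1
    by_cases h23 : m = 2 ∨ m = 3
    · rw [if_neg (fun h => h.2 (by simp only [List.mem_cons, List.not_mem_nil, or_false]; exact h23)),
          if_neg (by simp), if_pos rfl, if_pos (by omega)]
    · rw [if_pos ⟨rfl, by simp only [List.mem_cons, List.not_mem_nil, or_false]; exact h23⟩,
          if_pos rfl, if_neg (by omega)]
  · by_cases hv2 : v = "."
    · subst hv2
      rw [if_neg (fun h => hv1 h.1), if_neg hv1]
      by_cases h3 : m = 3
      · rw [if_pos ⟨rfl, h3⟩, if_pos rfl, if_pos (by omega)]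
      · rw [if_neg (fun h => h3 h.2), if_pos rfl, if_neg (by omega)]
    · rw [if_neg (fun h => hv1 h.1), if_neg (fun h => hv2 h.1), if_neg hv1, if_neg hv2]


theorem cube_activation_spec : Claim_equal_cube_activation := by
  intro current_plane dim4 _
  unfold Spec_cube_activation cube_activation cube_activation_alt expand_plane
  simp only []
  set orig := PySem.Dict.ofList (current_plane.map (fun r => ((r.1, r.2.1, r.2.2.1, r.2.2.2.1), r.2.2.2.2))) with horigdef
  have horig : orig.keys.Nodup := PySem.Dict.nodup_keys_ofList _
  set nb0 := orig.keys.foldl (fun d k => d.insert k (get_neighbors_positions k.1 k.2.1 k.2.2.1 k.2.2.2 dim4)) PySem.Dict.empty with hnb0def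
  have hnb0nd : nb0.keys.Nodup := by
    rw [hnb0def]
    exact PySem.Dict.nodup_keys_foldl_insert _ _ _ (by simp [PySem.Dict.keys_empty])
  have hinv0 : pvInv orig orig nb0 dim4 :=
    ⟨horig, hnb0nd, fun k _ => rfl, fun n hn => Or.inl hn, fun k hk => hk,
     fun k hk => by rw [hnb0def, pv_foldl_insert_fn_get?, if_pos hk]⟩
  obtain ⟨heq, hinv⟩ := pv_outer_fold orig dim4 orig.keys (fun k hk => hk) (orig, nb0) hinv0
  rw [pv_active_eq orig horig]
  rw [← heq]
  refine congrArg (List.map (fun kv : PVK × String => (kv.1.1, kv.1.2.1, kv.1.2.2.1, kv.1.2.2.2, kv.2)))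
    (congrArg PySem.Dict.items ?_)
  apply PySem.List.foldl_congr_mem
  intro acc kv hkv
  have hk := PySem.Dict.mem_keys_of_mem_items _ hkv
  have hc := pv_count_eq orig _ _ dim4 horig hinv kv.1 hk
  cases dim4 with
  | true =>
    rw [if_pos rfl] at hc
    exact pv_classify acc kv.1 kv.2 _ _ hc.symm
  | false =>
    rw [if_neg (by simp)] at hc
    simp only [Bool.false_eq_true, if_false]
    exact pv_classify acc kv.1 kv.2 _ _ hc.symm
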